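-- pv_equiv track=rewrite | github.com/py-why/causal-learn | causallearn/utils/GESUtils.py | insert_vc2_fast
-- ===== SOURCE A (Python) =====
-- def insert_vc2_fast(j, i, NAT_set, semi_succ):
--     """Check if every semi-directed path from j to i contains a node in NAT_set.
--
--     Uses precomputed semi_succ[node] and set-based NAT membership (O(1) lookup).
--     """
--     start = j
--     target = i
--     stack = [{"value": start, "pa": {}}]
--     sign = 1
--
--     while len(stack):
--         top = stack[0]
--         stack = stack[1:]
--         if top["value"] == target:
--             curr = top
--             ss = 0
--             while True:
--                 if curr["pa"]:
--                     if curr["pa"]["value"] in NAT_set: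
--                         ss = 1
--                         break
--                 else:
--                     break
--                 curr = curr["pa"]
--             if not ss:
--                 sign = 0
--                 break
--         else:
--             children = semi_succ.get(top["value"], set())
--             for child in children:
--                 # Check if child has appeared in path before
--                 curr = top
--                 appeared = False
--                 while True:
--                     if curr["pa"]:
--                         if curr["pa"]["value"] == child:
--                             appeared = True
--                             break
--                     else:
--                         break
--                     curr = curr["pa"]
--                 if not appeared:
--                     stack.insert(0, {"value": child, "pa": top})
--     return sign
-- ===== SOURCE B (Python) =====
-- def insert_vc2_fast(j, i, NAT_set, semi_succ):
--     """Check if every semi-directed path from j to i contains a node in NAT_set.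
--
--     Bounded fixed-point closure: grow the set of nodes reachable from j without
--     departing from a NAT_set node; len(semi_succ) rounds suffice since a shortest
--     admissible path departs from distinct keys of semi_succ.
--     """
--     reach = {j}
--     for _ in range(len(semi_succ)):
--         new = set(reach)
--         for u in reach:
--             if u not in NAT_set:
--                 new |= semi_succ.get(u, set())
--         reach = new
--     return 0 if i in reach else 1
-- ===== Notes on version B (the rewrite author's own statement) =====
-- stated objective: alternative
-- what changed: A enumerates appearance-limited semi-directed paths from j by DFS with explicit per-path parent chains and accepts when some fully-expanded path to i has no NAT_set ancestor; B instead computes the set of nodes reachable from j without departing from a NAT_set node by len(semi_succ) rounds of set expansion and just tests i for membership.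
import Mathlib
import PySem

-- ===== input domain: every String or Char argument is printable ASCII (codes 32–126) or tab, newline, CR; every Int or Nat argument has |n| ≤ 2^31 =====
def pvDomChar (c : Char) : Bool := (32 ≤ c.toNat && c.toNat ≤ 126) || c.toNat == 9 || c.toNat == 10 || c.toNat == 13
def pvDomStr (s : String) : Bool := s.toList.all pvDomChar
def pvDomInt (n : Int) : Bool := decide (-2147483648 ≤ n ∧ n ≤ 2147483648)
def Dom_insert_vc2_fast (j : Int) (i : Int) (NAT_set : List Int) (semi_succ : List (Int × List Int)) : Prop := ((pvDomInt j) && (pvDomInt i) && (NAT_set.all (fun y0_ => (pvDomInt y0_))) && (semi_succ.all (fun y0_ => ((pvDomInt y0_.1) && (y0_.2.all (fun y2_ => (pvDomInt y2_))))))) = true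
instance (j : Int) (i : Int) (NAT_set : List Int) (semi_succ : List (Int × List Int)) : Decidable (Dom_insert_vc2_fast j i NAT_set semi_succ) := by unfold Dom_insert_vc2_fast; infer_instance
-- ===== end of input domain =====

-- B replaces A's DFS enumeration of appearance-limited paths by a bounded
-- fixed-point closure of the set of nodes reachable without departing a NAT_set node.

-- ===== PORT A =====

-- semi_succ.get(v, set())
def getSucc (ss : List (Int × List Int)) (v : Int) : List Int :=
  PySem.Dict.getD (PySem.Dict.mk ss) v []

-- the inner while loop scanning the parent chain for a NAT_set member
def ancNAT (NAT : List Int) : List Int → Bool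
  | [] => false
  | a :: t => if NAT.contains a then true else ancNAT NAT t

-- the inner while loop checking whether `child` appeared among the strict ancestors
def appeared (c : Int) : List Int → Bool
  | [] => false
  | a :: t => if a == c then true else appeared c t

-- ---- termination measure for A's while loop (cited by decreasing_by only) ----
def wtW (U : Finset Int) (l : List Int) : Nat := ∑ v ∈ U, (2 - min (l.count v) 2)
def uniV (ss : List (Int × List Int)) : Finset Int := ((ss.map Prod.snd).flatten).toFinset
def bigB (ss : List (Int × List Int)) : Nat := 2 + (ss.map (fun p => p.2.length)).sum
def muS (ss : List (Int × List Int)) (S : List (Int × List Int)) : Nat :=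
  (S.map (fun p => bigB ss ^ wtW (uniV ss) (p.1 :: p.2))).sum

lemma getSucc_cons (k : Int) (vs : List Int) (t : List (Int × List Int)) (v : Int) :
    getSucc ((k, vs) :: t) v = if k == v then vs else getSucc t v := by
  simp [getSucc, PySem.Dict.getD, PySem.Dict.get?_mk_cons]
  split <;> simp

lemma getSucc_nil (v : Int) : getSucc [] v = [] := rfl

lemma getSucc_mem_flatten {ss : List (Int × List Int)} {v c : Int} (h : c ∈ getSucc ss v) :
    c ∈ (ss.map Prod.snd).flatten := by
  induction ss with
  | nil => rw [getSucc_nil] at h; cases h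
  | cons p t ih =>
    obtain ⟨k, vs⟩ := p
    rw [getSucc_cons] at h
    rw [List.map_cons, List.flatten_cons, List.mem_append]
    by_cases hk : (k == v) = true
    · rw [if_pos hk] at h; exact Or.inl h
    · rw [if_neg hk] at h; exact Or.inr (ih h)

lemma getSucc_len_le (ss : List (Int × List Int)) (v : Int) :
    (getSucc ss v).length ≤ (ss.map (fun p => p.2.length)).sum := by
  induction ss with
  | nil => rw [getSucc_nil]; simp
  | cons p t ih =>
    obtain ⟨k, vs⟩ := p
    rw [getSucc_cons]
    by_cases hk : (k == v) = true
    · rw [if_pos hk]; simp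
    · rw [if_neg hk]; simp; omega

lemma appeared_false_iff (c : Int) (l : List Int) : appeared c l = false ↔ c ∉ l := by
  induction l with
  | nil => simp [appeared]
  | cons a t ih =>
    rw [appeared]
    by_cases h : (a == c) = true
    · have := beq_iff_eq.mp h
      subst this
      simp
    · have hne : c ≠ a := fun he => h (by simp [he])
      simp [h, ih, hne]

lemma wtW_cons_push {U : Finset Int} {c : Int} (v : Int) {anc : List Int}
    (hc : c ∈ U) (hna : c ∉ anc) :
    wtW U (c :: v :: anc) + 1 = wtW U (v :: anc) := by
  unfold wtW
  rw [← Finset.add_sum_erase U _ hc, ← Finset.add_sum_erase U _ hc]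
  have hcongr : ∀ x ∈ U.erase c,
      (2 - min ((c :: v :: anc).count x) 2) = (2 - min ((v :: anc).count x) 2) := by
    intro x hx
    have hxc : x ≠ c := (Finset.mem_erase.mp hx).1
    have : List.count x (c :: v :: anc) = List.count x (v :: anc) := by
      rw [List.count_cons]
      simp [show (c == x) = false by simp [Ne.symm hxc]]
    rw [this]
  rw [Finset.sum_congr rfl hcongr]
  have hanc : List.count c anc = 0 := List.count_eq_zero.mpr hna
  have h1 : List.count c (c :: v :: anc) = List.count c (v :: anc) + 1 := by
    simp [List.count_cons]
  have h2 : List.count c (v :: anc) ≤ 1 := by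
    rw [List.count_cons, hanc]
    split <;> omega
  omega

lemma foldl_push_eq (anc : List Int) (v : Int) :
    ∀ (cs : List Int) (rest : List (Int × List Int)),
    cs.foldl (fun st c => if appeared c anc then st else (c, v :: anc) :: st) rest
      = ((cs.filter (fun c => !appeared c anc)).map (fun c => (c, v :: anc))).reverse ++ rest := by
  intro cs
  induction cs with
  | nil => intro rest; simp
  | cons c cs ih =>
    intro rest
    by_cases h : appeared c anc = true
    · rw [List.foldl_cons, if_pos h, ih rest, List.filter_cons]
      simp [h]
    · rw [List.foldl_cons, if_neg h, ih, List.filter_cons]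
      simp [h]

lemma muS_append (ss : List (Int × List Int)) (S1 S2 : List (Int × List Int)) :
    muS ss (S1 ++ S2) = muS ss S1 + muS ss S2 := by
  simp [muS]

lemma muS_reverse (ss : List (Int × List Int)) (S : List (Int × List Int)) :
    muS ss S.reverse = muS ss S := by
  simp [muS, List.map_reverse, List.sum_reverse]

lemma sum_map_const_of {α : Type} (l : List α) (f : α → Nat) (k : Nat)
    (h : ∀ x ∈ l, f x = k) : (l.map f).sum = l.length * k := by
  induction l with
  | nil => simp
  | cons a t ih =>
    simp only [List.map_cons, List.sum_cons, List.length_cons]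
    rw [h a (by simp), ih (fun x hx => h x (by simp [hx]))]
    ring

lemma mu_push_lt (ss : List (Int × List Int)) (v : Int) (anc : List Int)
    (rest : List (Int × List Int)) :
    muS ss ((getSucc ss v).foldl (fun st c => if appeared c anc then st else (c, v :: anc) :: st) rest)
      < muS ss ((v, anc) :: rest) := by
  rw [foldl_push_eq, muS_append, muS_reverse]
  have hcons : muS ss ((v, anc) :: rest) = bigB ss ^ wtW (uniV ss) (v :: anc) + muS ss rest := by
    simp [muS]
  rw [hcons]
  have hB : 2 ≤ bigB ss := by simp [bigB]
  suffices h : muS ss (((getSucc ss v).filter (fun c => !appeared c anc)).map (fun c => (c, v :: anc)))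
      < bigB ss ^ wtW (uniV ss) (v :: anc) by omega
  have hprop : ∀ c ∈ (getSucc ss v).filter (fun c => !appeared c anc), c ∈ uniV ss ∧ c ∉ anc := by
    intro c hc
    refine ⟨by simpa [uniV] using List.mem_toFinset.mpr (getSucc_mem_flatten (List.mem_of_mem_filter hc)), ?_⟩
    exact (appeared_false_iff c anc).mp (by simpa using List.of_mem_filter hc)
  have hterm : ∀ c ∈ (getSucc ss v).filter (fun c => !appeared c anc),
      wtW (uniV ss) (c :: v :: anc) + 1 = wtW (uniV ss) (v :: anc) := by
    intro c hc
    exact wtW_cons_push v (hprop c hc).1 (hprop c hc).2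
  cases hfe : (getSucc ss v).filter (fun c => !appeared c anc) with
  | nil => simpa [muS] using Nat.pow_pos (show 0 < bigB ss by omega)
  | cons c0 fl' =>
    rw [← hfe]
    have hW1 : 1 ≤ wtW (uniV ss) (v :: anc) := by
      have := hterm c0 (by rw [hfe]; simp)
      omega
    have hsum : muS ss (((getSucc ss v).filter (fun c => !appeared c anc)).map (fun c => (c, v :: anc)))
        = ((getSucc ss v).filter (fun c => !appeared c anc)).length
            * bigB ss ^ (wtW (uniV ss) (v :: anc) - 1) := by
      unfold muS
      rw [List.map_map]
      apply sum_map_const_of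
      intro c hc
      have := hterm c hc
      simp only [Function.comp_apply]
      congr 1
      omega
    rw [hsum]
    have hlen : ((getSucc ss v).filter (fun c => !appeared c anc)).length < bigB ss := by
      have h1 := List.length_filter_le (fun c => !appeared c anc) (getSucc ss v)
      have h2 := getSucc_len_le ss v
      simp only [bigB]
      omega
    calc ((getSucc ss v).filter (fun c => !appeared c anc)).length
            * bigB ss ^ (wtW (uniV ss) (v :: anc) - 1)
        < bigB ss * bigB ss ^ (wtW (uniV ss) (v :: anc) - 1) :=
          mul_lt_mul_of_pos_right hlen (Nat.pow_pos (by omega))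
      _ = bigB ss ^ wtW (uniV ss) (v :: anc) := by
          rw [← pow_succ']
          congr 1
          omega

-- the while loop of A: a stack entry is (value, chain of strict-ancestor values)
def insert_vc2_fastAux (i : Int) (NAT : List Int) (ss : List (Int × List Int)) :
    List (Int × List Int) → Int
  | [] => 1
  | (v, anc) :: rest =>
    if v == i then
      if ancNAT NAT anc then insert_vc2_fastAux i NAT ss rest else 0
    else
      insert_vc2_fastAux i NAT ss
        ((getSucc ss v).foldl (fun st c => if appeared c anc then st else (c, v :: anc) :: st) rest)
termination_by stack => muS ss stack
decreasing_by
  · have hB : 2 ≤ bigB ss := by simp [bigB]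
    have := Nat.pow_pos (show 0 < bigB ss by omega) (n := wtW (uniV ss) (v :: anc))
    simp only [muS, List.map_cons, List.sum_cons]
    omega
  · exact mu_push_lt ss v anc rest

def insert_vc2_fast (j : Int) (i : Int) (NAT_set : List Int) (semi_succ : List (Int × List Int)) : Int :=
  insert_vc2_fastAux i NAT_set semi_succ [(j, [])]

-- ===== PORT B =====

-- one round: new = set(reach); for u in reach: if u not in NAT_set: new |= semi_succ.get(u, set())
def stepR (NAT : List Int) (ss : List (Int × List Int)) (R : List Int) : List Int :=
  R.foldl (fun acc u => if NAT.contains u then acc else PySem.Set.update acc (getSucc ss u))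
    (PySem.Set.ofList R)

-- for _ in range(n): reach = stepR reach
def bIter (NAT : List Int) (ss : List (Int × List Int)) : Nat → List Int → List Int
  | 0, R => R
  | n + 1, R => bIter NAT ss n (stepR NAT ss R)

def insert_vc2_fast_alt (j : Int) (i : Int) (NAT_set : List Int) (semi_succ : List (Int × List Int)) : Int :=
  if (bIter NAT_set semi_succ semi_succ.length (PySem.Set.ofList [j])).contains i then 0 else 1

-- ===== PRECONDITION & SPEC =====
def Spec_insert_vc2_fast (j : Int) (i : Int) (NAT_set : List Int) (semi_succ : List (Int × List Int)) (out : Int) : Prop := out = insert_vc2_fast_alt j i NAT_set semi_succ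
instance (j : Int) (i : Int) (NAT_set : List Int) (semi_succ : List (Int × List Int)) (out : Int) : Decidable (Spec_insert_vc2_fast j i NAT_set semi_succ out) := by unfold Spec_insert_vc2_fast; infer_instance

-- ===== CLAIM (what is proved, stated in full; the proofs are below) =====
def Claim_equal_insert_vc2_fast : Prop := ∀ (j : Int) (i : Int) (NAT_set : List Int) (semi_succ : List (Int × List Int)), Dom_insert_vc2_fast j i NAT_set semi_succ → Spec_insert_vc2_fast j i NAT_set semi_succ (insert_vc2_fast j i NAT_set semi_succ)

-- ===== LEMMAS AND PROOFS =====

-- all values of a parent chain avoid NAT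
def NFree (NAT : List Int) (l : List Int) : Prop := ∀ a ∈ l, a ∉ NAT

-- "from cur, with strict-ancestor values anc, some appearance-respecting NAT-free
-- continuation reaches i" — the exact acceptance condition of A's DFS
inductive GEacc (i : Int) (NAT : List Int) (ss : List (Int × List Int)) : List Int → Int → Prop
  | done (anc : List Int) : GEacc i NAT ss anc i
  | step (anc : List Int) (cur c : Int) : cur ∉ NAT → c ∈ getSucc ss cur → c ∉ anc →
      GEacc i NAT ss (cur :: anc) c → GEacc i NAT ss anc cur

lemma ancNAT_false_iff (NAT l : List Int) : ancNAT NAT l = false ↔ NFree NAT l := by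
  induction l with
  | nil => simp [ancNAT, NFree]
  | cons a t ih =>
    rw [ancNAT]
    by_cases h : NAT.contains a = true
    · rw [if_pos h]
      constructor
      · intro hf; cases hf
      · intro hnf; exact absurd (List.contains_iff_mem.mp h) (hnf a (by simp))
    · rw [if_neg h, ih]
      constructor
      · intro hnf b hb
        rcases List.mem_cons.mp hb with hb | hb
        · subst hb; exact fun hm => h (List.contains_iff_mem.mpr hm)
        · exact hnf b hb
      · intro hnf b hb
        exact hnf b (by simp [hb])

lemma Aux_eq_zero_or_one (i : Int) (NAT : List Int) (ss : List (Int × List Int)) :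
    ∀ S, insert_vc2_fastAux i NAT ss S = 0 ∨ insert_vc2_fastAux i NAT ss S = 1 := by
  intro S
  fun_induction insert_vc2_fastAux i NAT ss S with
  | case1 => simp
  | case2 v anc rest h1 h2 ih => exact ih
  | case3 v anc rest h1 h2 => simp
  | case4 v anc rest h1 ih => simpa only [dite_eq_ite] using ih

lemma Aux_zero_iff (i : Int) (NAT : List Int) (ss : List (Int × List Int)) :
    ∀ S, insert_vc2_fastAux i NAT ss S = 0 ↔
      ∃ p ∈ S, NFree NAT p.2 ∧ GEacc i NAT ss p.2 p.1 := by
  intro S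
  fun_induction insert_vc2_fastAux i NAT ss S with
  | case1 => simp
  | case2 v anc rest h1 h2 ih =>
    rw [ih]
    constructor
    · rintro ⟨p, hp, hnf, hge⟩; exact ⟨p, by simp [hp], hnf, hge⟩
    · rintro ⟨p, hp, hnf, hge⟩
      rcases List.mem_cons.mp hp with hp | hp
      · exfalso
        subst hp
        have : ancNAT NAT anc = false := (ancNAT_false_iff NAT anc).mpr hnf
        rw [this] at h2; exact absurd h2 (by simp)
      · exact ⟨p, hp, hnf, hge⟩
  | case3 v anc rest h1 h2 =>
    have hv : v = i := beq_iff_eq.mp h1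
    constructor
    · intro _
      exact ⟨(v, anc), by simp, (ancNAT_false_iff NAT anc).mp (by simpa using h2),
        by rw [hv]; exact GEacc.done anc⟩
    · intro _; rfl
  | case4 v anc rest h1 ih =>
    have hv : v ≠ i := by simpa using h1
    rw [show (fun st c => if h : appeared c anc = true then st else (c, v :: anc) :: st)
        = (fun st c => if appeared c anc = true then st else (c, v :: anc) :: st) by
        funext st c; rw [dite_eq_ite]] at ih
    rw [ih, foldl_push_eq]
    constructor
    · rintro ⟨p, hp, hnf, hge⟩
      rcases List.mem_append.mp hp with hp | hp
      · -- p is a pushed child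
        rw [List.mem_reverse] at hp
        obtain ⟨c, hc, rfl⟩ := List.mem_map.mp hp
        have hcs := List.mem_of_mem_filter hc
        have hcna : c ∉ anc := (appeared_false_iff c anc).mp (by simpa using List.of_mem_filter hc)
        refine ⟨(v, anc), by simp, ?_, ?_⟩
        · intro a ha; exact hnf a (by simp [ha])
        · exact GEacc.step anc v c (hnf v (by simp)) hcs hcna hge
      · exact ⟨p, by simp [hp], hnf, hge⟩
    · rintro ⟨p, hp, hnf, hge⟩
      rcases List.mem_cons.mp hp with hp | hp
      · subst hp
        simp only at hnf hge
        rcases hge with _ | ⟨_, _, c, hcn, hcs, hcna, hge'⟩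
        · exact absurd rfl hv
        · refine ⟨(c, v :: anc), ?_, ?_, hge'⟩
          · apply List.mem_append.mpr
            left
            rw [List.mem_reverse]
            exact List.mem_map.mpr ⟨c, List.mem_filter.mpr
              ⟨hcs, by simpa using (appeared_false_iff c anc).mpr hcna⟩, rfl⟩
          · intro a ha
            rcases List.mem_cons.mp ha with ha | ha
            · subst ha; exact hcn
            · exact hnf a ha
      · exact ⟨p, List.mem_append.mpr (Or.inr hp), hnf, hge⟩

-- walks: Chn l holds when consecutive nodes of l are semi_succ edges departing outside NAT
def Chn (NAT : List Int) (ss : List (Int × List Int)) : List Int → Prop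
  | [] => True
  | [_] => True
  | a :: b :: t => a ∉ NAT ∧ b ∈ getSucc ss a ∧ Chn NAT ss (b :: t)

lemma Chn_nil (NAT : List Int) (ss : List (Int × List Int)) : Chn NAT ss [] := trivial

lemma Chn_single (NAT : List Int) (ss : List (Int × List Int)) (x : Int) :
    Chn NAT ss [x] := trivial

lemma Chn_cons_cons (NAT : List Int) (ss : List (Int × List Int)) (a b : Int) (t : List Int) :
    Chn NAT ss (a :: b :: t) ↔ a ∉ NAT ∧ b ∈ getSucc ss a ∧ Chn NAT ss (b :: t) := Iff.rfl

def HasPath (j i : Int) (NAT : List Int) (ss : List (Int × List Int)) : Prop :=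
  ∃ t : List Int, Chn NAT ss (j :: t) ∧ (j :: t).getLast? = some i

lemma Chn_tail {NAT : List Int} {ss : List (Int × List Int)} {a : Int} {t : List Int}
    (h : Chn NAT ss (a :: t)) : Chn NAT ss t := by
  cases t with
  | nil => exact Chn_nil NAT ss
  | cons b t => exact ((Chn_cons_cons NAT ss a b t).mp h).2.2

lemma Chn_suffix {NAT : List Int} {ss : List (Int × List Int)} :
    ∀ (l1 l2 : List Int), Chn NAT ss (l1 ++ l2) → Chn NAT ss l2 := by
  intro l1
  induction l1 with
  | nil => intro l2 h; exact h
  | cons a t ih => intro l2 h; exact ih l2 (Chn_tail h)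

lemma Chn_snoc {NAT : List Int} {ss : List (Int × List Int)} :
    ∀ (l : List Int) (u x : Int), Chn NAT ss l → l.getLast? = some u → u ∉ NAT →
      x ∈ getSucc ss u → Chn NAT ss (l ++ [x]) := by
  intro l
  induction l with
  | nil => intro u x _ h; simp at h
  | cons a t ih =>
    intro u x hc hl hu hx
    cases t with
    | nil =>
      simp at hl
      subst hl
      exact (Chn_cons_cons NAT ss a x []).mpr ⟨hu, hx, Chn_single NAT ss x⟩
    | cons b t' =>
      have hc' := (Chn_cons_cons NAT ss a b t').mp hc
      have hl' : (b :: t').getLast? = some u := by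
        rw [List.getLast?_cons_cons] at hl; exact hl
      exact (Chn_cons_cons NAT ss a b (t' ++ [x])).mpr
        ⟨hc'.1, hc'.2.1, ih u x hc'.2.2 hl' hu hx⟩

-- every walk shortens to a duplicate-free walk with the same endpoints
lemma Chn_shorten {NAT : List Int} {ss : List (Int × List Int)} :
    ∀ (n : Nat) (l : List Int), l.length ≤ n → Chn NAT ss l →
      ∃ l', l'.length ≤ l.length ∧ Chn NAT ss l' ∧ l'.Nodup ∧
        l'.head? = l.head? ∧ l'.getLast? = l.getLast? ∧ l' ⊆ l := by
  intro n
  induction n with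
  | zero =>
    intro l hl _
    have : l = [] := List.eq_nil_of_length_eq_zero (by omega)
    subst this
    exact ⟨[], by simp, Chn_nil NAT ss, by simp, by simp, by simp, by simp⟩
  | succ n ih =>
    intro l hl hc
    cases l with
    | nil => exact ⟨[], by simp, Chn_nil NAT ss, by simp, by simp, by simp, by simp⟩
    | cons x t =>
      by_cases hx : x ∈ t
      · obtain ⟨t1, t2, rfl⟩ := List.append_of_mem hx
        have hsuf : Chn NAT ss (x :: t2) :=
          Chn_suffix (x :: t1) (x :: t2) (by simpa using hc)
        have hlen : (x :: t2).length ≤ n := by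
          simp at hl ⊢
          omega
        obtain ⟨l', h1, h2, h3, h4, h5, h6⟩ := ih (x :: t2) hlen hsuf
        refine ⟨l', by simp at h1 ⊢; omega, h2, h3, by simpa using h4, ?_, ?_⟩
        · rw [show x :: (t1 ++ x :: t2) = (x :: t1) ++ (x :: t2) by simp,
            List.getLast?_append, h5]
          rcases hh : (x :: t2).getLast? with _ | z
          · simp at hh
          · rfl
        · intro a ha
          have := h6 ha
          simp at this ⊢
          tauto
      · cases t with
        | nil =>
          exact ⟨[x], by simp, Chn_single NAT ss x, by simp, by simp, by simp, by simp⟩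
        | cons b t' =>
          obtain ⟨l', h1, h2, h3, h4, h5, h6⟩ :=
            ih (b :: t') (by simp at hl ⊢; omega) (Chn_tail hc)
          obtain ⟨l'', rfl⟩ : ∃ r, l' = b :: r := by
            cases l' with
            | nil => simp at h4
            | cons y r => simp at h4; exact ⟨r, by rw [h4]⟩
          have hcc := (Chn_cons_cons NAT ss x b t').mp hc
          refine ⟨x :: b :: l'', by simp at h1 ⊢; omega,
            (Chn_cons_cons NAT ss x b l'').mpr ⟨hcc.1, hcc.2.1, h2⟩, ?_, by simp, ?_, ?_⟩
          · exact List.nodup_cons.mpr ⟨fun hmem => hx (h6 hmem), h3⟩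
          · rw [List.getLast?_cons_cons, List.getLast?_cons_cons, h5]
          · intro a ha
            rcases List.mem_cons.mp ha with ha | ha
            · simp [ha]
            · simpa using Or.inr (h6 ha)

-- a duplicate-free walk to i yields A's acceptance witness, for any disjoint ancestor chain
lemma Chn_toGEacc {i : Int} {NAT : List Int} {ss : List (Int × List Int)} :
    ∀ (l : List Int) (anc : List Int), Chn NAT ss l → l ≠ [] → l.getLast? = some i →
      l.Nodup → (∀ a ∈ anc, a ∉ l.tail) → GEacc i NAT ss anc (l.headI) := by
  intro l
  induction l with
  | nil => intro _ _ h; exact absurd rfl h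
  | cons a t ih =>
    intro anc hc _ hlast hnd hanc
    cases t with
    | nil =>
      simp at hlast
      subst hlast
      exact GEacc.done anc
    | cons b t' =>
      have hcc := (Chn_cons_cons NAT ss a b t').mp hc
      have hstep : GEacc i NAT ss (a :: anc) b := by
        have := ih (a :: anc) hcc.2.2 (by simp) (by rwa [List.getLast?_cons_cons] at hlast)
          (List.nodup_cons.mp hnd).2 ?_
        · simpa using this
        · intro x hx
          rcases List.mem_cons.mp hx with hx | hx
          · subst hx
            intro hmem
            exact (List.nodup_cons.mp hnd).1 (List.mem_cons_of_mem b (by simpa using hmem))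
          · intro hmem
            exact hanc x hx (List.mem_cons_of_mem b (by simpa using hmem))
      have hb : b ∉ anc := fun hmem => hanc b hmem (by simp)
      exact GEacc.step anc a b hcc.1 hcc.2.1 hb hstep

-- GEacc gives back a walk
lemma GEacc_toChn {i : Int} {NAT : List Int} {ss : List (Int × List Int)} :
    ∀ {anc : List Int} {cur : Int}, GEacc i NAT ss anc cur →
      ∃ t, Chn NAT ss (cur :: t) ∧ (cur :: t).getLast? = some i := by
  intro anc cur h
  induction h with
  | done anc => exact ⟨[], Chn_single NAT ss i, by simp⟩
  | step anc cur c hcn hcs _ _ ih =>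
    obtain ⟨t, hc, hl⟩ := ih
    exact ⟨c :: t, (Chn_cons_cons NAT ss cur c t).mpr ⟨hcn, hcs, hc⟩,
      by rwa [List.getLast?_cons_cons]⟩

-- ---- B-side lemmas ----

lemma mem_stepR {NAT : List Int} {ss : List (Int × List Int)} (R : List Int) (x : Int) :
    x ∈ stepR NAT ss R ↔ x ∈ R ∨ ∃ u ∈ R, u ∉ NAT ∧ x ∈ getSucc ss u := by
  have key : ∀ (L acc : List Int),
      x ∈ L.foldl (fun acc u => if NAT.contains u then acc else PySem.Set.update acc (getSucc ss u)) acc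
        ↔ x ∈ acc ∨ ∃ u ∈ L, u ∉ NAT ∧ x ∈ getSucc ss u := by
    intro L
    induction L with
    | nil => intro acc; simp
    | cons u L ih =>
      intro acc
      by_cases hu : NAT.contains u = true
      · rw [List.foldl_cons, if_pos hu, ih]
        have humem : u ∈ NAT := List.contains_iff_mem.mp hu
        constructor
        · rintro (h | ⟨w, hw, hwn, hwx⟩)
          · exact Or.inl h
          · exact Or.inr ⟨w, by simp [hw], hwn, hwx⟩
        · rintro (h | ⟨w, hw, hwn, hwx⟩)
          · exact Or.inl h
          · rcases List.mem_cons.mp hw with hw | hw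
            · subst hw; exact absurd humem hwn
            · exact Or.inr ⟨w, hw, hwn, hwx⟩
      · rw [List.foldl_cons, if_neg hu, ih]
        have hun : u ∉ NAT := fun hm => hu (List.contains_iff_mem.mpr hm)
        constructor
        · rintro (h | ⟨w, hw, hwn, hwx⟩)
          · rcases (PySem.Set.mem_update acc (getSucc ss u) x).mp h with h | h
            · exact Or.inl h
            · exact Or.inr ⟨u, by simp, hun, h⟩
          · exact Or.inr ⟨w, by simp [hw], hwn, hwx⟩
        · rintro (h | ⟨w, hw, hwn, hwx⟩)
          · exact Or.inl ((PySem.Set.mem_update acc (getSucc ss u) x).mpr (Or.inl h))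
          · rcases List.mem_cons.mp hw with hw | hw
            · exact Or.inl ((PySem.Set.mem_update acc (getSucc ss u) x).mpr (Or.inr (hw ▸ hwx)))
            · exact Or.inr ⟨w, hw, hwn, hwx⟩
  rw [stepR, key]
  rw [PySem.Set.mem_ofList]

lemma subset_stepR {NAT : List Int} {ss : List (Int × List Int)} (R : List Int) :
    R ⊆ stepR NAT ss R := fun x hx => (mem_stepR R x).mpr (Or.inl hx)

lemma bIter_succ_sub {NAT : List Int} {ss : List (Int × List Int)} :
    ∀ (n : Nat) (R : List Int), bIter NAT ss n R ⊆ bIter NAT ss (n + 1) R := by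
  intro n
  induction n with
  | zero => intro R; exact subset_stepR R
  | succ p ihp => intro R; exact ihp (stepR NAT ss R)

lemma bIter_grow {NAT : List Int} {ss : List (Int × List Int)} :
    ∀ (k m : Nat) (R : List Int), bIter NAT ss k R ⊆ bIter NAT ss (k + m) R := by
  intro k m
  induction m with
  | zero => intro R; exact fun x h => h
  | succ m ih =>
    intro R x hx
    exact bIter_succ_sub (k + m) R (ih R hx)

-- soundness: everything in the closure is walk-reachable from j
lemma bIter_sound {j : Int} {NAT : List Int} {ss : List (Int × List Int)} :
    ∀ (k : Nat) (R : List Int),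
      (∀ x ∈ R, ∃ t, Chn NAT ss (j :: t) ∧ (j :: t).getLast? = some x) →
      ∀ x ∈ bIter NAT ss k R, ∃ t, Chn NAT ss (j :: t) ∧ (j :: t).getLast? = some x := by
  intro k
  induction k with
  | zero => intro R h; exact h
  | succ n ih =>
    intro R h
    apply ih
    intro x hx
    rw [mem_stepR] at hx
    rcases hx with hx | ⟨u, hu, hun, hux⟩
    · exact h x hx
    · obtain ⟨t, hc, hl⟩ := h u hu
      refine ⟨t ++ [x], ?_, ?_⟩
      · rw [show j :: (t ++ [x]) = (j :: t) ++ [x] by simp]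
        exact Chn_snoc (j :: t) u x hc hl hun hux
      · rw [show j :: (t ++ [x]) = (j :: t) ++ [x] by simp, List.getLast?_concat]

-- following a walk into the closure, one round per edge
lemma bIter_follow {NAT : List Int} {ss : List (Int × List Int)} :
    ∀ (t : List Int) (v : Int) (R : List Int) (x : Int), Chn NAT ss (v :: t) → v ∈ R →
      (v :: t).getLast? = some x → x ∈ bIter NAT ss t.length R := by
  intro t
  induction t with
  | nil =>
    intro v R x _ hv hl
    simp at hl
    subst hl
    exact hv
  | cons b t' ih =>
    intro v R x hc hv hl
    have hcc := (Chn_cons_cons NAT ss v b t').mp hc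
    have hb : b ∈ stepR NAT ss R :=
      (mem_stepR R b).mpr (Or.inr ⟨v, hv, hcc.1, hcc.2.1⟩)
    have := ih b (stepR NAT ss R) x hcc.2.2 hb (by rwa [List.getLast?_cons_cons] at hl)
    simpa [bIter] using this

-- every departure of a walk is a key of semi_succ
lemma getSucc_key {ss : List (Int × List Int)} {a b : Int} (h : b ∈ getSucc ss a) :
    a ∈ ss.map Prod.fst := by
  induction ss with
  | nil => rw [getSucc_nil] at h; cases h
  | cons p t ih =>
    obtain ⟨k, vs⟩ := p
    rw [getSucc_cons] at h
    rw [List.map_cons, List.mem_cons]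
    by_cases hk : (k == a) = true
    · have hka : k = a := beq_iff_eq.mp hk
      subst hka
      exact Or.inl rfl
    · rw [if_neg hk] at h
      exact Or.inr (ih h)

lemma Chn_dropLast_keys {NAT : List Int} {ss : List (Int × List Int)} :
    ∀ (l : List Int), Chn NAT ss l → ∀ a ∈ l.dropLast, a ∈ ss.map Prod.fst := by
  intro l
  induction l with
  | nil => simp
  | cons x t ih =>
    intro hc a ha
    cases t with
    | nil => simp at ha
    | cons b t' =>
      have hcc := (Chn_cons_cons NAT ss x b t').mp hc
      rw [List.dropLast_cons₂] at ha
      rcases List.mem_cons.mp ha with ha | ha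
      · subst ha; exact getSucc_key hcc.2.1
      · exact ih hcc.2.2 a ha

-- A = 0 exactly when an admissible walk exists
lemma A_zero_iff (j i : Int) (NAT : List Int) (ss : List (Int × List Int)) :
    insert_vc2_fast j i NAT ss = 0 ↔ HasPath j i NAT ss := by
  rw [insert_vc2_fast, Aux_zero_iff]
  constructor
  · rintro ⟨p, hp, _, hge⟩
    simp at hp
    subst hp
    obtain ⟨t, hc, hl⟩ := GEacc_toChn (by simpa using hge)
    exact ⟨t, hc, hl⟩
  · rintro ⟨t, hc, hl⟩
    obtain ⟨l', _, h2, h3, h4, h5, _⟩ :=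
      Chn_shorten (j :: t).length (j :: t) le_rfl hc
    obtain ⟨t', rfl⟩ : ∃ r, l' = j :: r := by
      cases l' with
      | nil => simp at h4
      | cons y r => simp at h4; exact ⟨r, by rw [h4]⟩
    refine ⟨(j, []), by simp, by simp [NFree], ?_⟩
    have := Chn_toGEacc (j :: t') [] h2 (by simp) (h5.trans hl) h3 (by simp)
    simpa using this

-- B = 0 exactly when an admissible walk exists
lemma B_zero_iff (j i : Int) (NAT : List Int) (ss : List (Int × List Int)) :
    insert_vc2_fast_alt j i NAT ss = 0 ↔ HasPath j i NAT ss := by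
  rw [insert_vc2_fast_alt]
  have hmem : (bIter NAT ss ss.length (PySem.Set.ofList [j])).contains i = true ↔
      i ∈ bIter NAT ss ss.length (PySem.Set.ofList [j]) := List.contains_iff_mem
  constructor
  · intro h
    have hin : i ∈ bIter NAT ss ss.length (PySem.Set.ofList [j]) := by
      by_contra hni
      rw [if_neg (fun hc => hni (hmem.mp hc))] at h
      exact absurd h (by norm_num)
    obtain ⟨t, hc, hl⟩ := bIter_sound ss.length (PySem.Set.ofList [j])
      (by intro x hx
          rw [PySem.Set.mem_ofList] at hx
          simp at hx
          subst hx
          exact ⟨[], Chn_single NAT ss x, by simp⟩) i hin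
    exact ⟨t, hc, hl⟩
  · rintro ⟨t, hc, hl⟩
    obtain ⟨l', _, h2, h3, h4, h5, _⟩ :=
      Chn_shorten (j :: t).length (j :: t) le_rfl hc
    obtain ⟨t', rfl⟩ : ∃ r, l' = j :: r := by
      cases l' with
      | nil => simp at h4
      | cons y r => simp at h4; exact ⟨r, by rw [h4]⟩
    have hlen : t'.length ≤ ss.length := by
      have hdl : (j :: t').dropLast.Nodup := List.Nodup.sublist (List.dropLast_sublist _) h3
      have hsub : (j :: t').dropLast ⊆ ss.map Prod.fst := Chn_dropLast_keys (j :: t') h2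
      have := (List.Nodup.subperm hdl hsub).length_le
      simp [List.length_dropLast] at this
      omega
    have hi : i ∈ bIter NAT ss ss.length (PySem.Set.ofList [j]) := by
      have h0 : i ∈ bIter NAT ss t'.length (PySem.Set.ofList [j]) :=
        bIter_follow t' j (PySem.Set.ofList [j]) i h2
          (by rw [PySem.Set.mem_ofList]; simp) (h5.trans hl)
      have := bIter_grow (NAT := NAT) (ss := ss) t'.length (ss.length - t'.length) (PySem.Set.ofList [j])
      rw [show t'.length + (ss.length - t'.length) = ss.length by omega] at this
      exact this h0
    rw [if_pos (hmem.mpr hi)]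

-- ===== VERDICT (by name: the statement is the Claim_ definition above) =====
theorem insert_vc2_fast_spec : Claim_equal_insert_vc2_fast := by
  intro j i NAT ss _
  unfold Spec_insert_vc2_fast
  by_cases h : HasPath j i NAT ss
  · rw [(A_zero_iff j i NAT ss).mpr h, (B_zero_iff j i NAT ss).mpr h]
  · have hA : insert_vc2_fast j i NAT ss = 1 := by
      rcases Aux_eq_zero_or_one i NAT ss [(j, [])] with h0 | h1
      · exact absurd ((A_zero_iff j i NAT ss).mp h0) h
      · exact h1
    have hB : insert_vc2_fast_alt j i NAT ss = 1 := by
      rw [insert_vc2_fast_alt]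
      rw [if_neg]
      intro hc
      exact h ((B_zero_iff j i NAT ss).mp (by rw [insert_vc2_fast_alt, if_pos hc]))
    rw [hA, hB]
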